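-- pv_equiv track=rewrite | github.com/andy1li/codejam | 2014/D. Deceitful War/2014-q-d-small.py | solve
-- ===== SOURCE A (Python) =====
-- def solve(n, naomi, ken):
--     # Find out first Ken's optimal strategy and then Naomi's optimal deceptive strategy
--     naomi_asc = sorted(naomi)
--     naomi_dsc = sorted(naomi_asc, reverse=True)
--     ken_asc = sorted(ken)
--     ken_dsc = sorted(ken_asc, reverse=True)
--
--     deceitful_war_result = 0
--     war_result = 0
--
--     # Calculate deceitful_war:
--     # To win as many rounds as possible,
--     # naomi iteratively beats (ken's lightest remaining block)
--     # with (her lightest possible winning block)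
--     # by lying that it's heavier than (ken's heaviest one)
--     # to trick him to play (his lightest remaining one)
--     # until she cannot win anymore without giving aways her lies
--     i_k = 0
--     # print naomi_asc
--     # print ken_asc
--     for naomi_lightest_possible in naomi_asc:
--         if naomi_lightest_possible > ken_asc[i_k]:
--             # print naomi_lightest_possible, ">", ken_asc[i_k], "@", i_k
--             deceitful_war_result += 1
--             i_k += 1
--         # elif naomi_lightest_possible < ken_asc[i_k]:
--         #   continue
--
--
--     # Calculate war:
--     # naomi always plays her heaviest remaining block
--     # ken responds with as many "just heavier" block as possible
--     i_k = 0
--     #print naomi_dsc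
--     #print ken_dsc
--     for naomi_heavist_remaining in naomi_dsc:
--         if naomi_heavist_remaining > ken_dsc[i_k]:
--             # print naomi_heavist_remaining, ken_dsc[i_k], i_k
--             war_result += 1
--         elif naomi_heavist_remaining < ken_dsc[i_k]:
--             # print naomi_heavist_remaining, ken_dsc[i_k], i_k
--             i_k += 1
--
--     return deceitful_war_result, war_result
-- ===== SOURCE B (Python) =====
-- def solve(n, naomi, ken):
--     cn = {}
--     ck = {}
--     for x in naomi:
--         cn[x] = cn.get(x, 0) + 1
--     for y in ken:
--         ck[y] = ck.get(y, 0) + 1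
--     values = sorted(set(cn) | set(ck))
--     # deceitful war: sweep weights upward; each naomi block beats one of ken's
--     # still-unbeaten lighter blocks while any remain
--     deceitful = k_lt = 0
--     for v in values:
--         take = min(cn.get(v, 0), k_lt - deceitful)
--         deceitful += take
--         k_lt += ck.get(v, 0)
--     # war: sweep weights downward; ken's heavier blocks absorb naomi blocks one
--     # for one, and a weight ken cannot match at all scores for naomi
--     war = used = k_gt = 0
--     for v in reversed(values):
--         c = cn.get(v, 0)
--         take = min(c, k_gt - used)
--         used += take
--         if v not in ck:
--             war += c - take
--         k_gt += ck.get(v, 0)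
--     return deceitful, war
-- ===== Notes on version B (the rewrite author's own statement) =====
-- stated objective: alternative
-- what changed: B replaces A's four sorts and two pointer-chasing loops over the sorted block lists by frequency counters and two sweeps over the sorted distinct weights: an upward sweep computes the deceitful-war count from a running balance of ken's unbeaten lighter blocks, and a downward sweep computes the war count from a running balance of ken's unspent heavier blocks.
import Mathlib
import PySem

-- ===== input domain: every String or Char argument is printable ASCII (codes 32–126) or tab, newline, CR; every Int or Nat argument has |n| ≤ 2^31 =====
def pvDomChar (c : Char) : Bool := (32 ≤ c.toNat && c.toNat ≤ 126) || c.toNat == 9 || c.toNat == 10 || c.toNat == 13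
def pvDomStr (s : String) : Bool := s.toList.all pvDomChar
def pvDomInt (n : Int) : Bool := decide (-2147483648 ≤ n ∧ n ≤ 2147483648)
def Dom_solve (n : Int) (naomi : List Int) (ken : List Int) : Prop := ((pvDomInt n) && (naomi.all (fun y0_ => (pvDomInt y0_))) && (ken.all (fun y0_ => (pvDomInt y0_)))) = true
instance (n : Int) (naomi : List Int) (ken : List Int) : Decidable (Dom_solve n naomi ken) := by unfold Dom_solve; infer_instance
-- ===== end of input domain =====

-- B replaces A's four sorts and two pointer loops by frequency counters and two
-- sweeps over the sorted distinct weights, computing each result from a running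
-- balance of ken's unbeaten lighter / unspent heavier blocks (objective: alternative).

-- ===== PORT A =====
-- A indexes ken_asc[i_k] / ken_dsc[i_k] without a bound check; Python raises
-- IndexError out of range.  The port uses pyGetD; Pre_solve excludes exactly
-- the inputs where that index leaves the list.
def solve (n : Int) (naomi : List Int) (ken : List Int) : Int × Int :=
  let naomi_asc := PySem.List.sorted naomi (fun x => x) false
  let naomi_dsc := PySem.List.sorted naomi_asc (fun x => x) true
  let ken_asc := PySem.List.sorted ken (fun x => x) false
  let ken_dsc := PySem.List.sorted ken_asc (fun x => x) true
  -- deceitful war loop: state (deceitful_war_result, i_k)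
  let s1 := naomi_asc.foldl (fun (st : Int × Int) a =>
      if PySem.List.pyGetD ken_asc st.2 0 < a then (st.1 + 1, st.2 + 1) else st) (0, 0)
  -- war loop: state (war_result, i_k)
  let s2 := naomi_dsc.foldl (fun (st : Int × Int) a =>
      if PySem.List.pyGetD ken_dsc st.2 0 < a then (st.1 + 1, st.2)
      else if a < PySem.List.pyGetD ken_dsc st.2 0 then (st.1, st.2 + 1) else st) (0, 0)
  (s1.1, s2.1)

-- ===== PORT B =====
def solve_alt (n : Int) (naomi : List Int) (ken : List Int) : Int × Int :=
  let cn := naomi.foldl (fun (d : PySem.Dict Int Int) x => d.modify x 0 (· + 1)) PySem.Dict.empty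
  let ck := ken.foldl (fun (d : PySem.Dict Int Int) x => d.modify x 0 (· + 1)) PySem.Dict.empty
  let values := PySem.List.sorted
    (PySem.Set.union (PySem.Set.ofList (PySem.Dict.keys cn)) (PySem.Dict.keys ck))
    (fun x => x) false
  -- upward sweep: state (deceitful, k_lt)
  let s1 := values.foldl (fun (st : Int × Int) v =>
      let take := min (PySem.Dict.getD cn v 0) (st.2 - st.1)
      (st.1 + take, st.2 + PySem.Dict.getD ck v 0)) (0, 0)
  -- downward sweep: state (war, used, k_gt)
  let s2 := values.reverse.foldl (fun (st : Int × Int × Int) v =>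
      let c := PySem.Dict.getD cn v 0
      let take := min c (st.2.2 - st.2.1)
      ((if PySem.Dict.contains ck v then st.1 else st.1 + (c - take)),
       st.2.1 + take, st.2.2 + PySem.Dict.getD ck v 0)) (0, 0, 0)
  (s1.1, s2.1)

-- ===== PRECONDITION & SPEC =====
-- Pre_solve is exactly the set of inputs on which the Python A returns normally:
-- A raises IndexError on ken[i_k] precisely when naomi has more blocks than ken
-- AND one of the two sorted dominance conditions below holds (one per loop: the
-- pointer then runs off the end of ken before naomi is spent).
def Pre_solve (n : Int) (naomi : List Int) (ken : List Int) : Prop :=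
  naomi = [] ∨
    (ken ≠ [] ∧
      (naomi.length ≤ ken.length ∨
        ((¬ ∀ t, t < ken.length →
            (PySem.List.sorted ken (fun x => x) false).getD t 0 <
              (PySem.List.sorted naomi (fun x => x) false).getD
                (naomi.length - 1 - ken.length + t) 0) ∧
         (¬ ∀ t, t < ken.length →
            (PySem.List.sorted naomi (fun x => x) false).getD (t + 1) 0 <
              (PySem.List.sorted ken (fun x => x) false).getD t 0))))
instance (n : Int) (naomi : List Int) (ken : List Int) : Decidable (Pre_solve n naomi ken) := by
  unfold Pre_solve; infer_instance

def pvWitness_solve : Int × List Int × List Int := (2, [3, 7], [2, 5])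

def Spec_solve (n : Int) (naomi : List Int) (ken : List Int) (out : Int × Int) : Prop := out = solve_alt n naomi ken
instance (n : Int) (naomi : List Int) (ken : List Int) (out : Int × Int) : Decidable (Spec_solve n naomi ken out) := by unfold Spec_solve; infer_instance

-- ===== CLAIM (what is proved, stated in full; the proofs are below) =====
def Claim_equal_solve : Prop := ∀ (n : Int) (naomi : List Int) (ken : List Int), Dom_solve n naomi ken → Pre_solve n naomi ken → Spec_solve n naomi ken (solve n naomi ken)

-- ===== LEMMAS AND PROOFS =====

-- the guarded two-pointer count in consuming form (attacker list, defender suffix)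
def cw : List Int → List Int → Nat
  | [], _ => 0
  | _ :: as, [] => cw as []
  | a :: as, d :: ds => if d < a then cw as ds + 1 else cw as (d :: ds)

-- ken's pointer advance count read off A's war loop (naomi suffix, ken suffix, descending)
def dM : List Int → List Int → Nat
  | [], _ => 0
  | _ :: _, [] => 0
  | x :: ns, y :: ks => if x < y then dM ns ks + 1 else dM ns (y :: ks)

-- A's war-loop win count (naomi suffix, ken suffix, descending)
def W : List Int → List Int → Nat
  | [], _ => 0
  | _ :: _, [] => 0
  | x :: ns, y :: ks =>
      if y < x then W ns (y :: ks) + 1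
      else if x < y then W ns ks
      else W ns (y :: ks)

-- B's upward sweep (values, naomi, ken, balance of ken blocks below) in recursion form
def sweepD : List Int → List Int → List Int → Int → Int
  | [], _, _, _ => 0
  | v :: vs, N, K, d =>
      min (N.count v : Int) d + sweepD vs N K (d - min (N.count v : Int) d + (K.count v : Int))

-- B's downward sweep (values, naomi, ken, balance of ken blocks above) in recursion form
def sweepW : List Int → List Int → List Int → Int → Int
  | [], _, _, _ => 0
  | v :: vs, N, K, d =>
      (if K.count v = 0 then (N.count v : Int) - min (N.count v : Int) d else 0)
      + sweepW vs N K (d - min (N.count v : Int) d + (K.count v : Int))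

theorem dM_cons (x y : Int) (ns ks : List Int) :
    dM (x :: ns) (y :: ks) = if x < y then dM ns ks + 1 else dM ns (y :: ks) := rfl

theorem W_cons (x y : Int) (ns ks : List Int) :
    W (x :: ns) (y :: ks)
      = if y < x then W ns (y :: ks) + 1 else if x < y then W ns ks else W ns (y :: ks) := rfl

theorem cw_nil (as : List Int) : cw as [] = 0 := by
  induction as with
  | nil => rfl
  | cons a as ih => simpa [cw] using ih

theorem dM_nil (ns : List Int) : dM ns [] = 0 := by
  cases ns <;> rfl

theorem cw_le (as ds : List Int) : cw as ds ≤ ds.length := by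
  induction as generalizing ds with
  | nil => simp [cw]
  | cons a as ih =>
    cases ds with
    | nil => simp [cw_nil]
    | cons d t =>
      simp only [cw]
      split
      · have := ih t; simp; omega
      · exact ih (d :: t)

theorem cw_le_att (as : List Int) : ∀ ds, cw as ds ≤ as.length := by
  induction as with
  | nil => intro ds; simp [cw]
  | cons a as ih =>
    intro ds
    cases ds with
    | nil => simp only [cw, cw_nil, List.length_cons]; omega
    | cons d t =>
      simp only [cw, List.length_cons]
      split
      · have := ih t; omega
      · have := ih (d :: t); omega

theorem dM_le (ns : List Int) : ∀ ds, dM ns ds ≤ ns.length := by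
  induction ns with
  | nil => intro ds; simp [dM]
  | cons x ns ih =>
    intro ds
    cases ds with
    | nil => simp [dM]
    | cons y ks =>
      simp only [dM, List.length_cons]
      split
      · have := ih ks; omega
      · have := ih (y :: ks); omega

theorem dM_le_ks (ns : List Int) : ∀ ks, dM ns ks ≤ ks.length := by
  induction ns with
  | nil => intro ks; simp [dM]
  | cons x ns ih =>
    intro ks
    cases ks with
    | nil => simp [dM]
    | cons y kt =>
      simp only [dM, List.length_cons]
      split
      · have := ih kt; omega
      · have := ih (y :: kt); simp only [List.length_cons] at this; omega

-- if the ascending greedy saturates the defenders, the attackers dominate pointwise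

theorem cw_saturate : ∀ (as ds : List Int), as.Pairwise (· ≤ ·) → cw as ds = ds.length →
    ∀ t, t < ds.length → ds.getD t 0 < as.getD (as.length - ds.length + t) 0 := by
  intro as
  induction as with
  | nil =>
    intro ds _ h t ht
    simp [cw] at h
    omega
  | cons a as ih =>
    intro ds has h t ht
    have has' : as.Pairwise (· ≤ ·) := List.Pairwise.of_cons has
    have hamem : ∀ y ∈ as, a ≤ y := (List.pairwise_cons.1 has).1
    cases ds with
    | nil => simp at ht
    | cons d dt =>
      simp only [cw] at h
      by_cases hda : d < a
      · rw [if_pos hda] at h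
        have h' : cw as dt = dt.length := by
          simp only [List.length_cons] at h; omega
        have hlen : dt.length ≤ as.length := by have := cw_le_att as dt; omega
        cases t with
        | zero =>
          have hidx : (a :: as).length - (d :: dt).length + 0 = as.length - dt.length := by
            simp only [List.length_cons]; omega
          rw [hidx, List.getD_cons_zero]
          cases hq : as.length - dt.length with
          | zero => rw [List.getD_cons_zero]; exact hda
          | succ k =>
            rw [List.getD_cons_succ]
            have hk : k < as.length := by omega
            have hmem : as.getD k 0 ∈ as := by
              rw [List.getD_eq_getElem _ _ hk]; exact List.getElem_mem hk
            have := hamem _ hmem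
            omega
        | succ s =>
          have hs : s < dt.length := by simp at ht; omega
          have hidx : (a :: as).length - (d :: dt).length + (s + 1)
              = (as.length - dt.length + s) + 1 := by simp; omega
          rw [hidx, List.getD_cons_succ, List.getD_cons_succ]
          exact ih dt has' h' s hs
      · rw [if_neg hda] at h
        have hlen : (d :: dt).length ≤ as.length := by have := cw_le_att as (d :: dt); omega
        have hidx : (a :: as).length - (d :: dt).length + t
            = (as.length - (d :: dt).length + t) + 1 := by
          simp at hlen ⊢; omega
        rw [hidx, List.getD_cons_succ]
        exact ih (d :: dt) has' h t ht

-- if the descending greedy saturates ken, ken dominates pointwise from below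

theorem dM_saturate : ∀ (ns ks : List Int), ns.Pairwise (· ≥ ·) → dM ns ks = ks.length →
    ∀ t, t < ks.length → ns.getD (ns.length - ks.length + t) 0 < ks.getD t 0 := by
  intro ns
  induction ns with
  | nil =>
    intro ks _ h t ht
    simp [dM] at h
    omega
  | cons x ns ih =>
    intro ks hns h t ht
    have hns' : ns.Pairwise (· ≥ ·) := List.Pairwise.of_cons hns
    have hxmem : ∀ y ∈ ns, y ≤ x := (List.pairwise_cons.1 hns).1
    cases ks with
    | nil => simp at ht
    | cons y kt =>
      simp only [dM] at h
      by_cases hxy : x < y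
      · rw [if_pos hxy] at h
        have h' : dM ns kt = kt.length := by
          simp only [List.length_cons] at h; omega
        have hlen : kt.length ≤ ns.length := by have := dM_le ns kt; omega
        cases t with
        | zero =>
          have hidx : (x :: ns).length - (y :: kt).length + 0 = ns.length - kt.length := by
            simp only [List.length_cons]; omega
          rw [hidx, List.getD_cons_zero]
          cases hq : ns.length - kt.length with
          | zero => rw [List.getD_cons_zero]; exact hxy
          | succ k =>
            rw [List.getD_cons_succ]
            have hk : k < ns.length := by omega
            have hmem : ns.getD k 0 ∈ ns := by
              rw [List.getD_eq_getElem _ _ hk]; exact List.getElem_mem hk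
            have := hxmem _ hmem
            omega
        | succ s =>
          have hs : s < kt.length := by simp at ht; omega
          have hidx : (x :: ns).length - (y :: kt).length + (s + 1)
              = (ns.length - kt.length + s) + 1 := by simp; omega
          rw [hidx, List.getD_cons_succ, List.getD_cons_succ]
          exact ih kt hns' h' s hs
      · rw [if_neg hxy] at h
        have hlen : (y :: kt).length ≤ ns.length := by have := dM_le ns (y :: kt); omega
        have hidx : (x :: ns).length - (y :: kt).length + t
            = (ns.length - (y :: kt).length + t) + 1 := by
          simp at hlen ⊢; omega
        rw [hidx, List.getD_cons_succ]
        exact ih (y :: kt) hns' h t ht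

-- bridge: B's count_wins fold equals cw on the defender suffix

theorem deceit_fold (d : List Int) :
    ∀ (as : List Int) (c : Int) (i : Nat),
    (as = [] ∨ i + cw (as.take (as.length - 1)) (d.drop i) < d.length) →
    as.foldl (fun (st : Int × Int) a =>
      if PySem.List.pyGetD d st.2 0 < a then (st.1 + 1, st.2 + 1) else st) (c, (i : Int))
    = (c + (cw as (d.drop i) : Int), (i : Int) + (cw as (d.drop i) : Int)) := by
  intro as
  induction as with
  | nil => intro c i _; simp [cw]
  | cons a as ih =>
    intro c i hsafe
    rcases hsafe with h | hsafe
    · exact absurd h (by simp)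
    have hlt : i < d.length := by omega
    obtain ⟨e, hdrop, hget⟩ :
        ∃ e, d.drop i = e :: d.drop (i + 1) ∧ PySem.List.pyGetD d (i : Int) 0 = e :=
      ⟨d[i], List.drop_eq_getElem_cons hlt, by simp [List.getD_eq_getElem?_getD, hlt]⟩
    cases as with
    | nil =>
      rw [List.foldl_cons]
      dsimp only
      rw [hget, List.foldl_nil]
      by_cases hb : e < a
      · have hcw : cw [a] (d.drop i) = 1 := by
          rw [hdrop]; simp only [cw]; rw [if_pos hb]
        rw [if_pos hb, hcw]; norm_num
      · have hcw : cw [a] (d.drop i) = 0 := by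
          rw [hdrop]; simp only [cw]; rw [if_neg hb]
        rw [if_neg hb, hcw]; norm_num
    | cons b as' =>
      have htake : (a :: b :: as').take ((a :: b :: as').length - 1)
          = a :: (b :: as').take ((b :: as').length - 1) := by
        simp
      rw [htake] at hsafe
      rw [List.foldl_cons]
      dsimp only
      rw [hget]
      by_cases hb : e < a
      · have hcwt : cw (a :: (b :: as').take ((b :: as').length - 1)) (d.drop i)
            = cw ((b :: as').take ((b :: as').length - 1)) (d.drop (i + 1)) + 1 := by
          rw [hdrop]; simp only [cw]; rw [if_pos hb]
        have hcw : cw (a :: b :: as') (d.drop i) = cw (b :: as') (d.drop (i + 1)) + 1 := by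
          rw [hdrop]; simp only [cw]; rw [if_pos hb]
        rw [if_pos hb]
        rw [show ((i : Int) + 1) = ((i + 1 : Nat) : Int) by push_cast; ring]
        rw [ih (c + 1) (i + 1) (Or.inr (by rw [hcwt] at hsafe; omega))]
        rw [hcw]
        simp only [Prod.mk.injEq]
        constructor <;> (push_cast; ring)
      · have hcwt : cw (a :: (b :: as').take ((b :: as').length - 1)) (d.drop i)
            = cw ((b :: as').take ((b :: as').length - 1)) (d.drop i) := by
          rw [hdrop]; simp only [cw]; rw [if_neg hb]
        have hcw : cw (a :: b :: as') (d.drop i) = cw (b :: as') (d.drop i) := by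
          rw [hdrop]; simp only [cw]; rw [if_neg hb]
        rw [if_neg hb]
        rw [ih c i (Or.inr (by rw [hcwt] at hsafe; omega))]
        rw [hcw]

-- bridge: A's war fold equals (W, dM) with the pointer in range at every access

theorem war_fold (d : List Int) :
    ∀ (ns : List Int) (c : Int) (i : Nat),
    (ns = [] ∨ i + dM (ns.take (ns.length - 1)) (d.drop i) < d.length) →
    ns.foldl (fun (st : Int × Int) a =>
      if PySem.List.pyGetD d st.2 0 < a then (st.1 + 1, st.2)
      else if a < PySem.List.pyGetD d st.2 0 then (st.1, st.2 + 1) else st) (c, (i : Int))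
    = (c + (W ns (d.drop i) : Int), (i : Int) + (dM ns (d.drop i) : Int)) := by
  intro ns
  induction ns with
  | nil => intro c i _; simp [W, dM]
  | cons x ns ih =>
    intro c i hsafe
    rcases hsafe with h | hsafe
    · exact absurd h (by simp)
    have hlt : i < d.length := by omega
    obtain ⟨e, hdrop, hget⟩ :
        ∃ e, d.drop i = e :: d.drop (i + 1) ∧ PySem.List.pyGetD d (i : Int) 0 = e :=
      ⟨d[i], List.drop_eq_getElem_cons hlt, by simp [List.getD_eq_getElem?_getD, hlt]⟩
    cases ns with
    | nil =>
      rw [List.foldl_cons]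
      dsimp only
      rw [hget, List.foldl_nil]
      rcases lt_trichotomy x e with hx | hx | hx
      · have hW : W [x] (d.drop i) = 0 := by
          rw [hdrop]; simp only [W]; rw [if_neg (by omega), if_pos hx]
        have hdm : dM [x] (d.drop i) = 1 := by
          rw [hdrop]; simp only [dM]; rw [if_pos hx]
        rw [if_neg (by omega), if_pos hx, hW, hdm]; norm_num
      · have hW : W [x] (d.drop i) = 0 := by
          rw [hdrop]; simp only [W]; rw [if_neg (by omega), if_neg (by omega)]
        have hdm : dM [x] (d.drop i) = 0 := by
          rw [hdrop]; simp only [dM]; rw [if_neg (by omega)]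
        rw [if_neg (by omega), if_neg (by omega), hW, hdm]; norm_num
      · have hW : W [x] (d.drop i) = 1 := by
          rw [hdrop]; simp only [W]; rw [if_pos hx]
        have hdm : dM [x] (d.drop i) = 0 := by
          rw [hdrop]; simp only [dM]; rw [if_neg (by omega)]
        rw [if_pos hx, hW, hdm]; norm_num
    | cons z ns' =>
      have htake : (x :: z :: ns').take ((x :: z :: ns').length - 1)
          = x :: (z :: ns').take ((z :: ns').length - 1) := by
        simp
      rw [htake] at hsafe
      rw [List.foldl_cons]
      dsimp only
      rw [hget]
      rcases lt_trichotomy x e with hx | hx | hx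
      · -- advance
        have hdmt : dM (x :: (z :: ns').take ((z :: ns').length - 1)) (d.drop i)
            = dM ((z :: ns').take ((z :: ns').length - 1)) (d.drop (i + 1)) + 1 := by
          rw [hdrop]; simp only [dM]; rw [if_pos hx]
        have hdm : dM (x :: z :: ns') (d.drop i) = dM (z :: ns') (d.drop (i + 1)) + 1 := by
          rw [hdrop]; simp only [dM]; rw [if_pos hx]
        have hW : W (x :: z :: ns') (d.drop i) = W (z :: ns') (d.drop (i + 1)) := by
          rw [hdrop]; simp only [W]; rw [if_neg (by omega), if_pos hx]
        rw [if_neg (by omega), if_pos hx]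
        rw [show ((i : Int) + 1) = ((i + 1 : Nat) : Int) by push_cast; ring]
        rw [ih c (i + 1) (Or.inr (by rw [hdmt] at hsafe; omega))]
        rw [hW, hdm]
        simp only [Prod.mk.injEq]
        exact ⟨trivial, by push_cast; ring⟩
      · -- tie: neither branch fires, state unchanged
        have hdmt : dM (x :: (z :: ns').take ((z :: ns').length - 1)) (d.drop i)
            = dM ((z :: ns').take ((z :: ns').length - 1)) (d.drop i) := by
          rw [hdrop]; simp only [dM]; rw [if_neg (by omega)]
        have hdm : dM (x :: z :: ns') (d.drop i) = dM (z :: ns') (d.drop i) := by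
          rw [hdrop]; simp only [dM]; rw [if_neg (by omega)]
        have hW : W (x :: z :: ns') (d.drop i) = W (z :: ns') (d.drop i) := by
          rw [hdrop]; simp only [W]; rw [if_neg (by omega), if_neg (by omega)]
        rw [if_neg (by omega), if_neg (by omega)]
        rw [ih c i (Or.inr (by rw [hdmt] at hsafe; omega))]
        rw [hW, hdm]
      · -- win
        have hdmt : dM (x :: (z :: ns').take ((z :: ns').length - 1)) (d.drop i)
            = dM ((z :: ns').take ((z :: ns').length - 1)) (d.drop i) := by
          rw [hdrop]; simp only [dM]; rw [if_neg (by omega)]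
        have hdm : dM (x :: z :: ns') (d.drop i) = dM (z :: ns') (d.drop i) := by
          rw [hdrop]; simp only [dM]; rw [if_neg (by omega)]
        have hW : W (x :: z :: ns') (d.drop i) = W (z :: ns') (d.drop i) + 1 := by
          rw [hdrop]; simp only [W]; rw [if_pos hx]
        rw [if_pos hx]
        rw [ih (c + 1) i (Or.inr (by rw [hdmt] at hsafe; omega))]
        rw [hW, hdm]
        simp only [Prod.mk.injEq]
        exact ⟨by push_cast; ring, trivial⟩

-- the greedy count splits over an attacker append: the second batch faces the
-- defenders the first batch left over

theorem cw_append : ∀ (as bs ds : List Int),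
    cw (as ++ bs) ds = cw as ds + cw bs (ds.drop (cw as ds)) := by
  intro as
  induction as with
  | nil => intro bs ds; simp [cw]
  | cons a as ih =>
    intro bs ds
    cases ds with
    | nil =>
      simp [cw, cw_nil]
    | cons d ds' =>
      simp only [List.cons_append, cw]
      by_cases hb : d < a
      · rw [if_pos hb, if_pos hb, ih bs ds']
        simp only [List.drop_succ_cons]
        omega
      · rw [if_neg hb, if_neg hb, ih bs (d :: ds')]

-- defenders no attacker can beat may be removed from the tail

theorem sorted_rev_eq_reverse (xs : List Int) :
    PySem.List.sorted xs (fun x => x) true = (PySem.List.sorted xs (fun x => x) false).reverse := by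
  have h1 : ((PySem.List.sorted xs (fun x => x) true).reverse).Perm
      (PySem.List.sorted xs (fun x => x) false) :=
    ((List.reverse_perm _).trans (PySem.List.sorted_perm xs _ _)).trans
      (PySem.List.sorted_perm xs _ _).symm
  have h2 : ((PySem.List.sorted xs (fun x => x) true).reverse).Pairwise (· ≤ ·) := by
    rw [List.pairwise_reverse]
    exact PySem.List.sorted_pairwise_rev xs _
  have h3 : (PySem.List.sorted xs (fun x => x) false).Pairwise (· ≤ ·) :=
    PySem.List.sorted_pairwise xs _
  have h4 := PySem.List.eq_of_perm_of_pairwise_le_of_injective (fun x : Int => x)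
    (fun a b h => h) h1 h2 h3
  have h5 := congrArg List.reverse h4
  simpa using h5

-- ===== VERDICT (by name: the statement is the Claim_ definition above) =====


theorem cw_cons (a d : Int) (as ds : List Int) :
    cw (a :: as) (d :: ds) = if d < a then cw as ds + 1 else cw as (d :: ds) := rfl

theorem W_nil (ns : List Int) : W ns [] = 0 := by cases ns <;> rfl

theorem dM_append : ∀ (p q ks : List Int),
    dM (p ++ q) ks = dM p ks + dM q (ks.drop (dM p ks)) := by
  intro p
  induction p with
  | nil => intro q ks; simp [dM]
  | cons x p ih =>
    intro q ks
    cases ks with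
    | nil =>
      have h1 : dM (x :: (p ++ q)) [] = 0 := rfl
      have h2 : dM (x :: p) [] = 0 := rfl
      simp [h1, h2, dM_nil]
    | cons y ks' =>
      simp only [List.cons_append, dM_cons]
      by_cases hx : x < y
      · rw [if_pos hx, if_pos hx, ih q ks']
        simp [Nat.add_right_comm]
      · rw [if_neg hx, if_neg hx, ih q (y :: ks')]

theorem W_append : ∀ (p q ks : List Int),
    W (p ++ q) ks = W p ks + W q (ks.drop (dM p ks)) := by
  intro p
  induction p with
  | nil => intro q ks; simp [W, dM]
  | cons x p ih =>
    intro q ks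
    cases ks with
    | nil =>
      have h1 : W (x :: (p ++ q)) [] = 0 := rfl
      have h2 : W (x :: p) [] = 0 := rfl
      have h3 : dM (x :: p) [] = 0 := rfl
      simp [h1, h2, h3, W_nil]
    | cons y ks' =>
      simp only [List.cons_append, W_cons, dM_cons]
      rcases lt_trichotomy x y with hx | hx | hx
      · rw [if_neg (by omega), if_pos hx, if_neg (by omega), if_pos hx, if_pos hx,
            ih q ks']
        simp
      · rw [if_neg (by omega), if_neg (by omega), if_neg (by omega), if_neg (by omega),
            if_neg (by omega), ih q (y :: ks')]
      · rw [if_pos hx, if_pos hx, if_neg (by omega), ih q (y :: ks')]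
        simp [Nat.add_right_comm]

theorem dM_prefix_le (l ks : List Int) (j : Nat) : dM (l.take j) ks ≤ dM l ks := by
  conv_rhs => rw [← List.take_append_drop j l]
  rw [dM_append]
  omega

theorem cw_replicate : ∀ (c : Nat) (v : Int) (Klow Krest : List Int),
    (∀ y ∈ Klow, y < v) → (∀ y ∈ Krest, ¬ y < v) →
    cw (List.replicate c v) (Klow ++ Krest) = min c Klow.length := by
  intro c
  induction c with
  | zero => intro v Klow Krest _ _; simp [cw]
  | succ c ih =>
    intro v Klow Krest h1 h2
    rw [List.replicate_succ]
    cases Klow with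
    | nil =>
      simp only [List.nil_append, List.length_nil, Nat.min_zero]
      cases Krest with
      | nil => simp [cw_nil]
      | cons k kr =>
        rw [cw_cons, if_neg (h2 k (by simp))]
        have := ih v [] (k :: kr) (by simp) h2
        simpa using this
    | cons y Klow' =>
      rw [List.cons_append, cw_cons, if_pos (h1 y (by simp))]
      rw [ih v Klow' Krest (fun z hz => h1 z (by simp [hz])) h2]
      simp only [List.length_cons]
      omega

theorem dM_replicate : ∀ (c : Nat) (v : Int) (Khigh K : List Int),
    (∀ y ∈ Khigh, v < y) → (∀ y ∈ K, ¬ v < y) →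
    dM (List.replicate c v) (Khigh ++ K) = min c Khigh.length := by
  intro c
  induction c with
  | zero => intro v Khigh K _ _; simp [dM]
  | succ c ih =>
    intro v Khigh K h1 h2
    rw [List.replicate_succ]
    cases Khigh with
    | nil =>
      simp only [List.nil_append, List.length_nil, Nat.min_zero]
      cases K with
      | nil => rfl
      | cons k kr =>
        rw [dM_cons, if_neg (h2 k (by simp))]
        have := ih v [] (k :: kr) (by simp) h2
        simpa using this
    | cons y Khigh' =>
      rw [List.cons_append, dM_cons, if_pos (h1 y (by simp))]
      rw [ih v Khigh' K (fun z hz => h1 z (by simp [hz])) h2]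
      simp only [List.length_cons]
      omega

theorem W_replicate_tie : ∀ (c : Nat) (v : Int) (Khigh K₂ : List Int),
    (∀ y ∈ Khigh, v < y) → W (List.replicate c v) (Khigh ++ v :: K₂) = 0 := by
  intro c
  induction c with
  | zero => intro v Khigh K₂ _; simp [W]
  | succ c ih =>
    intro v Khigh K₂ h1
    rw [List.replicate_succ]
    cases Khigh with
    | nil =>
      simp only [List.nil_append]
      rw [W_cons, if_neg (by omega), if_neg (by omega)]
      have := ih v [] K₂ (by simp)
      simpa using this
    | cons y Khigh' =>
      have hy : v < y := h1 y (by simp)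
      rw [List.cons_append, W_cons, if_neg (by omega), if_pos hy]
      exact ih v Khigh' K₂ (fun z hz => h1 z (by simp [hz]))

theorem W_replicate_win : ∀ (c : Nat) (v : Int) (Khigh K' : List Int),
    (∀ y ∈ Khigh, v < y) → (∀ y ∈ K', y < v) → (c ≤ Khigh.length ∨ K' ≠ []) →
    W (List.replicate c v) (Khigh ++ K') = c - min c Khigh.length := by
  intro c
  induction c with
  | zero => intro v Khigh K' _ _ _; simp [W]
  | succ c ih =>
    intro v Khigh K' h1 h2 hside
    rw [List.replicate_succ]
    cases Khigh with
    | nil =>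
      have hK' : K' ≠ [] := by
        rcases hside with h | h
        · simp at h
        · exact h
      obtain ⟨k, K₂, rfl⟩ := List.exists_cons_of_ne_nil hK'
      simp only [List.nil_append, List.length_nil, Nat.min_zero]
      rw [W_cons, if_pos (h2 k (by simp))]
      have := ih v [] (k :: K₂) (by simp) h2 (Or.inr (by simp))
      simp only [List.nil_append, List.length_nil, Nat.min_zero, Nat.sub_zero] at this
      omega
    | cons y Khigh' =>
      have hy : v < y := h1 y (by simp)
      rw [List.cons_append, W_cons, if_neg (by omega), if_pos hy]
      have hside' : c ≤ Khigh'.length ∨ K' ≠ [] := by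
        rcases hside with h | h
        · left; simpa using h
        · exact Or.inr h
      rw [ih v Khigh' K' (fun z hz => h1 z (by simp [hz])) h2 hside']
      simp only [List.length_cons]
      omega

-- a sorted list bounded below by v is a run of v's followed by strictly larger values
theorem run_split_asc (v : Int) : ∀ S : List Int, S.Pairwise (· ≤ ·) → (∀ x ∈ S, v ≤ x) →
    ∃ S', S = List.replicate (S.count v) v ++ S' ∧ S'.Pairwise (· ≤ ·) ∧ (∀ x ∈ S', v < x) := by
  intro S
  induction S with
  | nil => intro _ _; exact ⟨[], by simp, by simp, by simp⟩
  | cons x S ih =>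
    intro hp hb
    by_cases hx : x = v
    · subst hx
      obtain ⟨S', heq, hp', hgt⟩ := ih (List.Pairwise.of_cons hp) (fun y hy => hb y (by simp [hy]))
      refine ⟨S', ?_, hp', hgt⟩
      rw [List.count_cons_self, List.replicate_succ, List.cons_append]
      exact congrArg (x :: ·) heq
    · have hvx : v < x := lt_of_le_of_ne (hb x (by simp)) (fun h => hx h.symm)
      have hcnt : (x :: S).count v = 0 := by
        rw [List.count_eq_zero]
        intro hmem
        rcases List.mem_cons.1 hmem with h | h
        · exact hx h.symm
        · have := (List.pairwise_cons.1 hp).1 v h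
          omega
      refine ⟨x :: S, by simp [hcnt], hp, ?_⟩
      intro y hy
      rcases List.mem_cons.1 hy with rfl | hy
      · exact hvx
      · have := (List.pairwise_cons.1 hp).1 y hy
        omega

-- a descending list bounded above by v is a run of v's followed by strictly smaller values
theorem run_split_desc (v : Int) : ∀ S : List Int, S.Pairwise (· ≥ ·) → (∀ x ∈ S, x ≤ v) →
    ∃ S', S = List.replicate (S.count v) v ++ S' ∧ S'.Pairwise (· ≥ ·) ∧ (∀ x ∈ S', x < v) := by
  intro S
  induction S with
  | nil => intro _ _; exact ⟨[], by simp, by simp, by simp⟩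
  | cons x S ih =>
    intro hp hb
    by_cases hx : x = v
    · subst hx
      obtain ⟨S', heq, hp', hlt⟩ := ih (List.Pairwise.of_cons hp) (fun y hy => hb y (by simp [hy]))
      refine ⟨S', ?_, hp', hlt⟩
      rw [List.count_cons_self, List.replicate_succ, List.cons_append]
      exact congrArg (x :: ·) heq
    · have hvx : x < v := lt_of_le_of_ne (hb x (by simp)) hx
      have hcnt : (x :: S).count v = 0 := by
        rw [List.count_eq_zero]
        intro hmem
        rcases List.mem_cons.1 hmem with h | h
        · exact hx h.symm
        · have := (List.pairwise_cons.1 hp).1 v h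
          omega
      refine ⟨x :: S, by simp [hcnt], hp, ?_⟩
      intro y hy
      rcases List.mem_cons.1 hy with rfl | hy
      · exact hvx
      · have := (List.pairwise_cons.1 hp).1 y hy
        omega

theorem sweepD_congr : ∀ (vs N K N' K' : List Int) (d : Int),
    (∀ v ∈ vs, N.count v = N'.count v) → (∀ v ∈ vs, K.count v = K'.count v) →
    sweepD vs N K d = sweepD vs N' K' d := by
  intro vs
  induction vs with
  | nil => intros; rfl
  | cons v vs ih =>
    intro N K N' K' d h1 h2
    simp only [sweepD]
    rw [h1 v (by simp), h2 v (by simp),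
        ih N K N' K' _ (fun w hw => h1 w (by simp [hw])) (fun w hw => h2 w (by simp [hw]))]

theorem sweepW_congr : ∀ (vs N K N' K' : List Int) (d : Int),
    (∀ v ∈ vs, N.count v = N'.count v) → (∀ v ∈ vs, K.count v = K'.count v) →
    sweepW vs N K d = sweepW vs N' K' d := by
  intro vs
  induction vs with
  | nil => intros; rfl
  | cons v vs ih =>
    intro N K N' K' d h1 h2
    simp only [sweepW]
    rw [h1 v (by simp), h2 v (by simp),
        ih N K N' K' _ (fun w hw => h1 w (by simp [hw])) (fun w hw => h2 w (by simp [hw]))]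

-- B's upward fold equals sweepD
theorem foldD (N K : List Int) : ∀ (vs : List Int) (w klt : Int),
    (vs.foldl (fun (st : Int × Int) v =>
        (st.1 + min ((N.count v : Int)) (st.2 - st.1), st.2 + (K.count v : Int))) (w, klt)).1
      = w + sweepD vs N K (klt - w) := by
  intro vs
  induction vs with
  | nil => intro w klt; simp [sweepD]
  | cons v vs ih =>
    intro w klt
    rw [List.foldl_cons]
    dsimp only
    rw [ih]
    simp only [sweepD]
    have harg : klt + (K.count v : Int) - (w + min ((N.count v : Int)) (klt - w))
        = klt - w - min ((N.count v : Int)) (klt - w) + (K.count v : Int) := by ring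
    rw [harg]
    ring

-- B's downward fold equals sweepW
theorem foldW (N K : List Int) : ∀ (vs : List Int) (w u g : Int),
    (vs.foldl (fun (st : Int × Int × Int) v =>
        ((if K.count v = 0
            then st.1 + ((N.count v : Int) - min ((N.count v : Int)) (st.2.2 - st.2.1))
            else st.1),
         st.2.1 + min ((N.count v : Int)) (st.2.2 - st.2.1),
         st.2.2 + (K.count v : Int))) (w, u, g)).1
      = w + sweepW vs N K (g - u) := by
  intro vs
  induction vs with
  | nil => intro w u g; simp [sweepW]
  | cons v vs ih =>
    intro w u g
    rw [List.foldl_cons]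
    dsimp only
    rw [ih]
    simp only [sweepW]
    have harg : g + (K.count v : Int) - (u + min ((N.count v : Int)) (g - u))
        = g - u - min ((N.count v : Int)) (g - u) + (K.count v : Int) := by ring
    rw [harg]
    split_ifs <;> ring

-- the upward sweep computes the ascending greedy count
theorem sweepD_eq_cw : ∀ (vs S K Klow : List Int),
    vs.Pairwise (· < ·) → S.Pairwise (· ≤ ·) → K.Pairwise (· ≤ ·) →
    (∀ x ∈ S, x ∈ vs) → (∀ y ∈ K, y ∈ vs) → (∀ y ∈ Klow, ∀ w ∈ vs, y < w) →
    sweepD vs S K (Klow.length : Int) = (cw S (Klow ++ K) : Int) := by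
  intro vs
  induction vs with
  | nil =>
    intro S K Klow _ _ _ hSm _ _
    have hS0 : S = [] := by
      cases S with
      | nil => rfl
      | cons a S => exact absurd (hSm a (by simp)) (by simp)
    subst hS0
    simp [sweepD, cw]
  | cons v vs ih =>
    intro S K Klow hvs hSp hKp hSm hKm hKlow
    have hvlt : ∀ w ∈ vs, v < w := (List.pairwise_cons.1 hvs).1
    have hvs' : vs.Pairwise (· < ·) := List.Pairwise.of_cons hvs
    have hSge : ∀ x ∈ S, v ≤ x := by
      intro x hx
      rcases List.mem_cons.1 (hSm x hx) with rfl | h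
      · exact le_refl x
      · exact le_of_lt (hvlt x h)
    have hKge : ∀ y ∈ K, v ≤ y := by
      intro y hy
      rcases List.mem_cons.1 (hKm y hy) with rfl | h
      · exact le_refl y
      · exact le_of_lt (hvlt y h)
    obtain ⟨S', hSeq, hS'p, hS'gt⟩ := run_split_asc v S hSp hSge
    obtain ⟨K', hKeq, hK'p, hK'gt⟩ := run_split_asc v K hKp hKge
    set c := S.count v with hc
    set kc := K.count v with hkc
    have h2 : cw (List.replicate c v) (Klow ++ K) = min c Klow.length :=
      cw_replicate c v Klow K (fun y hy => hKlow y hy v (by simp))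
        (fun y hy => not_lt.2 (hKge y hy))
    have h1 : cw S (Klow ++ K)
        = min c Klow.length
          + cw S' ((Klow ++ K).drop (min c Klow.length)) := by
      conv_lhs => rw [hSeq]
      rw [cw_append, h2]
    have htle : min c Klow.length ≤ Klow.length := min_le_right ..
    have h3 : (Klow ++ K).drop (min c Klow.length)
        = (Klow.drop (min c Klow.length) ++ List.replicate kc v) ++ K' := by
      rw [List.drop_append_of_le_length htle, hKeq, List.append_assoc]
    have hS'm : ∀ x ∈ S', x ∈ vs := by
      intro x hx
      have hxS : x ∈ S := by rw [hSeq]; exact List.mem_append_right _ hx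
      rcases List.mem_cons.1 (hSm x hxS) with rfl | h
      · exact absurd (hS'gt x hx) (lt_irrefl x)
      · exact h
    have hK'm : ∀ y ∈ K', y ∈ vs := by
      intro y hy
      have hyK : y ∈ K := by rw [hKeq]; exact List.mem_append_right _ hy
      rcases List.mem_cons.1 (hKm y hyK) with rfl | h
      · exact absurd (hK'gt y hy) (lt_irrefl y)
      · exact h
    have hKlow2 : ∀ y ∈ Klow.drop (min c Klow.length) ++ List.replicate kc v,
        ∀ w ∈ vs, y < w := by
      intro y hy w hw
      rcases List.mem_append.1 hy with hy | hy
      · exact hKlow y (List.mem_of_mem_drop hy) w (by simp [hw])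
      · rw [List.eq_of_mem_replicate hy]
        exact hvlt w hw
    have hcnt1 : ∀ w ∈ vs, S.count w = S'.count w := by
      intro w hw
      rw [hSeq, List.count_append, List.count_replicate]
      have hne : ¬ v = w := by have := hvlt w hw; omega
      simp [hne]
    have hcnt2 : ∀ w ∈ vs, K.count w = K'.count w := by
      intro w hw
      rw [hKeq, List.count_append, List.count_replicate]
      have hne : ¬ v = w := by have := hvlt w hw; omega
      simp [hne]
    have hIH := ih S' K' (Klow.drop (min c Klow.length) ++ List.replicate kc v)
      hvs' hS'p hK'p hS'm hK'm hKlow2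
    have hlen : ((Klow.drop (min c Klow.length) ++ List.replicate kc v).length : Int)
        = (Klow.length : Int) - min ((c : Int)) (Klow.length : Int) + (kc : Int) := by
      simp only [List.length_append, List.length_drop, List.length_replicate]
      push_cast
      omega
    simp only [sweepD]
    rw [sweepD_congr vs S K S' K' _ hcnt1 hcnt2, ← hlen, hIH, ← h3, h1]
    push_cast
    omega

-- the downward sweep computes A's war count (ken never exhausted: no IndexError)
theorem sweepW_eq_W : ∀ (vs ns K Khigh : List Int),
    vs.Pairwise (· > ·) → ns.Pairwise (· ≥ ·) → K.Pairwise (· ≥ ·) →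
    (∀ x ∈ ns, x ∈ vs) → (∀ y ∈ K, y ∈ vs) → (∀ y ∈ Khigh, ∀ w ∈ vs, w < y) →
    (∀ j, j < ns.length → dM (ns.take j) (Khigh ++ K) < (Khigh ++ K).length) →
    sweepW vs ns K (Khigh.length : Int) = (W ns (Khigh ++ K) : Int) := by
  intro vs
  induction vs with
  | nil =>
    intro ns K Khigh _ _ _ hnm _ _ _
    have h0 : ns = [] := by
      cases ns with
      | nil => rfl
      | cons a ns => exact absurd (hnm a (by simp)) (by simp)
    subst h0
    simp [sweepW, W]
  | cons v vs ih =>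
    intro ns K Khigh hvs hnp hKp hnm hKm hKhigh hcr
    have hvgt : ∀ w ∈ vs, w < v := (List.pairwise_cons.1 hvs).1
    have hvs' : vs.Pairwise (· > ·) := List.Pairwise.of_cons hvs
    have hnle : ∀ x ∈ ns, x ≤ v := by
      intro x hx
      rcases List.mem_cons.1 (hnm x hx) with rfl | h
      · exact le_refl x
      · exact le_of_lt (hvgt x h)
    have hKle : ∀ y ∈ K, y ≤ v := by
      intro y hy
      rcases List.mem_cons.1 (hKm y hy) with rfl | h
      · exact le_refl y
      · exact le_of_lt (hvgt y h)
    obtain ⟨ns', hneq, hn'p, hn'lt⟩ := run_split_desc v ns hnp hnle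
    obtain ⟨K', hKeq, hK'p, hK'lt⟩ := run_split_desc v K hKp hKle
    set c := ns.count v with hc
    set kc := K.count v with hkc
    have hKhv : ∀ y ∈ Khigh, v < y := fun y hy => hKhigh y hy v (by simp)
    have hdm : dM (List.replicate c v) (Khigh ++ K) = min c Khigh.length :=
      dM_replicate c v Khigh K hKhv (fun y hy => not_lt.2 (hKle y hy))
    have hW1 : W ns (Khigh ++ K)
        = W (List.replicate c v) (Khigh ++ K)
          + W ns' ((Khigh ++ K).drop (min c Khigh.length)) := by
      conv_lhs => rw [hneq]
      rw [W_append, hdm]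
    have htle : min c Khigh.length ≤ Khigh.length := min_le_right ..
    have h3 : (Khigh ++ K).drop (min c Khigh.length)
        = (Khigh.drop (min c Khigh.length) ++ List.replicate kc v) ++ K' := by
      rw [List.drop_append_of_le_length htle, hKeq, List.append_assoc]
    have hWrep : W (List.replicate c v) (Khigh ++ K)
        = (if kc = 0 then c - min c Khigh.length else 0) := by
      by_cases hkc : kc = 0
      · have hKK' : K = K' := by rw [hKeq, hkc]; simp
        have hside : c ≤ Khigh.length ∨ K' ≠ [] := by
          by_contra hcon
          push_neg at hcon
          obtain ⟨hc1, hc2⟩ := hcon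
          have htK : min c Khigh.length = Khigh.length := by omega
          have hclen : c ≤ ns.length := List.count_le_length
          have htlen : Khigh.length < ns.length := by omega
          have hTake : ns.take Khigh.length = List.replicate Khigh.length v := by
            rw [hneq, List.take_append, List.take_replicate]
            have e1 : Khigh.length - (List.replicate c v).length = 0 := by
              simp only [List.length_replicate]; omega
            have e2 : min Khigh.length c = Khigh.length := by omega
            rw [e1, e2, List.take_zero, List.append_nil]
          have hdt : dM (ns.take Khigh.length) (Khigh ++ K) = Khigh.length := by
            rw [hTake]
            rw [dM_replicate Khigh.length v Khigh K hKhv (fun y hy => not_lt.2 (hKle y hy))]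
            omega
          have := hcr Khigh.length htlen
          rw [hdt, hKK', hc2] at this
          simp at this
        rw [if_pos hkc, hKK']
        exact W_replicate_win c v Khigh K' hKhv hK'lt (by rw [← hKK'] at hside ⊢; exact hside)
      · rw [if_neg hkc]
        have hkpos : 0 < kc := Nat.pos_of_ne_zero hkc
        obtain ⟨K₂, hK2⟩ : ∃ K₂, K = v :: K₂ := by
          obtain ⟨m, hm⟩ := Nat.exists_eq_succ_of_ne_zero hkc
          refine ⟨List.replicate m v ++ K', ?_⟩
          rw [hKeq, hm, List.replicate_succ, List.cons_append]
        rw [hK2]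
        exact W_replicate_tie c v Khigh K₂ hKhv
    have hn'm : ∀ x ∈ ns', x ∈ vs := by
      intro x hx
      have hxS : x ∈ ns := by rw [hneq]; exact List.mem_append_right _ hx
      rcases List.mem_cons.1 (hnm x hxS) with rfl | h
      · exact absurd (hn'lt x hx) (lt_irrefl x)
      · exact h
    have hK'm : ∀ y ∈ K', y ∈ vs := by
      intro y hy
      have hyK : y ∈ K := by rw [hKeq]; exact List.mem_append_right _ hy
      rcases List.mem_cons.1 (hKm y hyK) with rfl | h
      · exact absurd (hK'lt y hy) (lt_irrefl y)
      · exact h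
    have hKhigh2 : ∀ y ∈ Khigh.drop (min c Khigh.length) ++ List.replicate kc v,
        ∀ w ∈ vs, w < y := by
      intro y hy w hw
      rcases List.mem_append.1 hy with hy | hy
      · exact hKhigh y (List.mem_of_mem_drop hy) w (by simp [hw])
      · rw [List.eq_of_mem_replicate hy]
        exact hvgt w hw
    have hcr' : ∀ j, j < ns'.length →
        dM (ns'.take j)
            ((Khigh.drop (min c Khigh.length) ++ List.replicate kc v) ++ K')
          < ((Khigh.drop (min c Khigh.length) ++ List.replicate kc v) ++ K').length := by
      intro j hj
      have h4 : ns.take (c + j) = List.replicate c v ++ ns'.take j := by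
        rw [hneq, List.take_append, List.take_replicate]
        have e1 : c + j - (List.replicate c v).length = j := by
          simp only [List.length_replicate]; omega
        have e2 : min (c + j) c = c := by omega
        rw [e1, e2]
      have h5 := hcr (c + j) (by
        have : ns.length = c + ns'.length := by rw [hneq]; simp
        omega)
      rw [h4, dM_append, hdm, h3] at h5
      have hlen5 : (Khigh ++ K).length
          = min c Khigh.length
            + ((Khigh.drop (min c Khigh.length) ++ List.replicate kc v) ++ K').length := by
        simp only [List.length_append, List.length_drop, List.length_replicate]
        have : K.length = kc + K'.length := by
          rw [hKeq]; simp
        omega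
      omega
    have hcnt1 : ∀ w ∈ vs, ns.count w = ns'.count w := by
      intro w hw
      rw [hneq, List.count_append, List.count_replicate]
      have hne : ¬ v = w := by have := hvgt w hw; omega
      simp [hne]
    have hcnt2 : ∀ w ∈ vs, K.count w = K'.count w := by
      intro w hw
      rw [hKeq, List.count_append, List.count_replicate]
      have hne : ¬ v = w := by have := hvgt w hw; omega
      simp [hne]
    have hIH := ih ns' K' (Khigh.drop (min c Khigh.length) ++ List.replicate kc v)
      hvs' hn'p hK'p hn'm hK'm hKhigh2 hcr'
    have hlen : ((Khigh.drop (min c Khigh.length) ++ List.replicate kc v).length : Int)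
        = (Khigh.length : Int) - min ((c : Int)) (Khigh.length : Int) + (kc : Int) := by
      simp only [List.length_append, List.length_drop, List.length_replicate]
      push_cast
      omega
    simp only [sweepW]
    rw [sweepW_congr vs ns K ns' K' _ hcnt1 hcnt2, ← hlen, hIH, ← h3, hW1, hWrep]
    have hmin : min ((c : Int)) (Khigh.length : Int)
        = ((min c Khigh.length : Nat) : Int) := by push_cast; omega
    by_cases hkc : kc = 0
    · simp only [if_pos hkc]
      push_cast
      have := Nat.min_le_left c Khigh.length
      omega
    · simp only [if_neg hkc]
      push_cast
      omega

-- sorting a duplicate-free list is strictly increasing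
theorem sorted_pairwise_lt_of_nodup (xs : List Int) (h : xs.Nodup) :
    (PySem.List.sorted xs (fun x => x) false).Pairwise (· < ·) := by
  have hle : (PySem.List.sorted xs (fun x => x) false).Pairwise (· ≤ ·) :=
    PySem.List.sorted_pairwise xs _
  have hnd : (PySem.List.sorted xs (fun x => x) false).Nodup :=
    ((PySem.List.sorted_perm xs _ _).nodup_iff).2 h
  have hand := List.Pairwise.and hle hnd
  exact hand.imp (fun h => lt_of_le_of_ne h.1 h.2)


-- ===== VERDICT (by name: the statement is the Claim_ definition above) =====
theorem solve_spec : Claim_equal_solve := by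
  intro n naomi ken _ hpre
  unfold Spec_solve
  simp only [solve, solve_alt]
  rw [← PySem.Dict.counter_eq_foldl naomi, ← PySem.Dict.counter_eq_foldl ken]
  set S := PySem.List.sorted naomi (fun x => x) false with hS
  set K := PySem.List.sorted ken (fun x => x) false with hK
  have hSlen : S.length = naomi.length := PySem.List.length_sorted ..
  have hKlen : K.length = ken.length := PySem.List.length_sorted ..
  have hSd : PySem.List.sorted S (fun x => x) true = S.reverse := by
    rw [hS, sorted_rev_eq_reverse, PySem.List.sorted_sorted]
  have hKd : PySem.List.sorted K (fun x => x) true = K.reverse := by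
    rw [hK, sorted_rev_eq_reverse, PySem.List.sorted_sorted]
  rw [hSd, hKd]
  have hSpair : S.Pairwise (· ≤ ·) := by rw [hS]; exact PySem.List.sorted_pairwise ..
  have hKpair : K.Pairwise (· ≤ ·) := by rw [hK]; exact PySem.List.sorted_pairwise ..
  have hSperm : S.Perm naomi := by rw [hS]; exact PySem.List.sorted_perm ..
  have hKperm : K.Perm ken := by rw [hK]; exact PySem.List.sorted_perm ..
  -- the sorted distinct-values list
  set U := PySem.Set.union (PySem.Set.ofList (PySem.Dict.keys (PySem.Dict.counter naomi)))
      (PySem.Dict.keys (PySem.Dict.counter ken)) with hU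
  set V := PySem.List.sorted U (fun x => x) false with hV
  have hUkeys : U = PySem.Set.union (PySem.Set.ofList naomi) (PySem.Set.ofList ken) := by
    rw [hU, PySem.Dict.keys_counter, PySem.Dict.keys_counter, PySem.Set.ofList_ofList]
  have hUmem : ∀ x : Int, x ∈ U ↔ (x ∈ naomi ∨ x ∈ ken) := by
    intro x
    rw [hUkeys, PySem.Set.mem_union, PySem.Set.mem_ofList, PySem.Set.mem_ofList]
  have hUnodup : U.Nodup := by
    rw [hUkeys]
    exact PySem.Set.nodup_union _ _ (PySem.Set.nodup_ofList _)
  have hVlt : V.Pairwise (· < ·) := by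
    rw [hV]; exact sorted_pairwise_lt_of_nodup U hUnodup
  have hVmem : ∀ x : Int, x ∈ V ↔ (x ∈ naomi ∨ x ∈ ken) := by
    intro x
    rw [hV, (PySem.List.sorted_perm U _ _).mem_iff]
    exact hUmem x
  -- loop 1 of A never indexes ken out of range on Pre_
  have hsafe1 : S = [] ∨ 0 + cw (S.take (S.length - 1)) (K.drop 0) < K.length := by
    rw [List.drop_zero]
    by_cases h0 : naomi = []
    · left
      have : S.length = 0 := by rw [hSlen, h0]; rfl
      exact List.eq_nil_of_length_eq_zero this
    rcases hpre with h | ⟨hk, hdisj2⟩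
    · exact absurd h h0
    have hkpos : 0 < ken.length := by
      cases ken
      · exact absurd rfl hk
      · simp
    right
    have h1 : cw (S.take (S.length - 1)) K ≤ (S.take (S.length - 1)).length := cw_le_att ..
    have h2 : (S.take (S.length - 1)).length = S.length - 1 := by simp
    by_cases hLL : naomi.length ≤ ken.length
    · omega
    rcases hdisj2 with h | ⟨hA, _⟩
    · exact absurd h hLL
    have hub : cw (S.take (S.length - 1)) K ≤ K.length := cw_le ..
    rcases lt_or_eq_of_le hub with hlt2 | heq
    · omega
    exfalso
    apply hA
    have hpairT : (S.take (S.length - 1)).Pairwise (· ≤ ·) :=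
      List.Pairwise.sublist (List.take_sublist ..) hSpair
    have hsat := cw_saturate (S.take (S.length - 1)) K hpairT heq
    intro t ht
    have ht' : t < K.length := by omega
    have h3 := hsat t ht'
    have hidx : (S.take (S.length - 1)).length - K.length + t
        = naomi.length - 1 - ken.length + t := by rw [h2]; omega
    rw [hidx] at h3
    have hbound1 : naomi.length - 1 - ken.length + t < S.length - 1 := by omega
    have hgetT : (S.take (S.length - 1)).getD (naomi.length - 1 - ken.length + t) 0
        = S.getD (naomi.length - 1 - ken.length + t) 0 := by
      rw [List.getD_eq_getElem _ _ (by rw [h2]; omega),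
          List.getD_eq_getElem _ _ (by omega)]
      exact List.getElem_take ..
    rw [hgetT] at h3
    exact h3
  -- loop 2 of A never indexes ken out of range on Pre_
  have hsafe2 : S.reverse = [] ∨
      0 + dM (S.reverse.take (S.reverse.length - 1)) (K.reverse.drop 0) < K.reverse.length := by
    rw [List.drop_zero]
    by_cases h0 : naomi = []
    · left
      have : S.length = 0 := by rw [hSlen, h0]; rfl
      rw [List.eq_nil_of_length_eq_zero this]
      rfl
    rcases hpre with h | ⟨hk, hdisj2⟩
    · exact absurd h h0
    have hkpos : 0 < ken.length := by
      cases ken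
      · exact absurd rfl hk
      · simp
    right
    have h1 : dM (S.reverse.take (S.reverse.length - 1)) K.reverse
        ≤ (S.reverse.take (S.reverse.length - 1)).length := dM_le ..
    have h2 : (S.reverse.take (S.reverse.length - 1)).length = S.length - 1 := by simp
    have hKr : K.reverse.length = K.length := by simp
    rw [hKr]
    by_cases hLL : naomi.length ≤ ken.length
    · omega
    rcases hdisj2 with h | ⟨_, hB⟩
    · exact absurd h hLL
    have hub : dM (S.reverse.take (S.reverse.length - 1)) K.reverse ≤ K.reverse.length :=
      dM_le_ks ..
    rw [hKr] at hub
    rcases lt_or_eq_of_le hub with hlt2 | heq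
    · omega
    exfalso
    apply hB
    have hpairT : (S.reverse.take (S.reverse.length - 1)).Pairwise (· ≥ ·) := by
      have hrev : S.reverse.Pairwise (· ≥ ·) := by
        rw [List.pairwise_reverse]; exact hSpair
      exact List.Pairwise.sublist (List.take_sublist ..) hrev
    have heq' : dM (S.reverse.take (S.reverse.length - 1)) K.reverse = K.reverse.length := by
      rw [hKr]; exact heq
    have hsat := dM_saturate _ _ hpairT heq'
    intro u hu
    have ht : ken.length - 1 - u < K.reverse.length := by rw [hKr, hKlen]; omega
    have h3 := hsat (ken.length - 1 - u) ht
    have hidx : (S.reverse.take (S.reverse.length - 1)).length - K.reverse.length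
        + (ken.length - 1 - u) = naomi.length - 2 - u := by
      rw [h2, hKr]; omega
    rw [hidx] at h3
    have hb1 : naomi.length - 2 - u < S.length - 1 := by omega
    have hgetL : (S.reverse.take (S.reverse.length - 1)).getD (naomi.length - 2 - u) 0
        = S.getD (u + 1) 0 := by
      rw [List.getD_eq_getElem _ _ (by rw [h2]; omega),
          List.getD_eq_getElem _ _ (by rw [hSlen]; omega)]
      rw [List.getElem_take, List.getElem_reverse]
      congr 1
      omega
    have hgetR : (K.reverse).getD (ken.length - 1 - u) 0 = K.getD u 0 := by
      rw [List.getD_eq_getElem _ _ (by simp [hKlen]; omega),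
          List.getD_eq_getElem _ _ (by rw [hKlen]; omega)]
      rw [List.getElem_reverse]
      congr 1
      omega
    rw [hgetL, hgetR] at h3
    exact h3
  have hA1 := deceit_fold K S 0 0 hsafe1
  have hA2 := war_fold K.reverse S.reverse 0 0 hsafe2
  simp only [Nat.cast_zero, List.drop_zero] at hA1 hA2
  rw [hA1, hA2]
  -- B's upward fold
  have hf1 : (fun (st : Int × Int) v =>
        let take := min (PySem.Dict.getD (PySem.Dict.counter naomi) v 0) (st.2 - st.1)
        (st.1 + take, st.2 + PySem.Dict.getD (PySem.Dict.counter ken) v 0))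
      = (fun (st : Int × Int) v =>
        (st.1 + min ((naomi.count v : Int)) (st.2 - st.1), st.2 + (ken.count v : Int))) := by
    funext st v
    simp [PySem.Dict.getD_counter]
  have hB1 : (V.foldl (fun (st : Int × Int) v =>
        let take := min (PySem.Dict.getD (PySem.Dict.counter naomi) v 0) (st.2 - st.1)
        (st.1 + take, st.2 + PySem.Dict.getD (PySem.Dict.counter ken) v 0))
        ((0 : Int), (0 : Int))).1 = (cw S K : Int) := by
    rw [hf1, foldD naomi ken V 0 0]
    have hc1 : ∀ v ∈ V, naomi.count v = S.count v := fun v _ => (hSperm.count_eq v).symm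
    have hc2 : ∀ v ∈ V, ken.count v = K.count v := fun v _ => (hKperm.count_eq v).symm
    rw [sweepD_congr V naomi ken S K _ hc1 hc2]
    have := sweepD_eq_cw V S K [] hVlt hSpair hKpair
      (fun x hx => (hVmem x).2 (Or.inl (hSperm.mem_iff.1 hx)))
      (fun y hy => (hVmem y).2 (Or.inr (hKperm.mem_iff.1 hy)))
      (by simp)
    simpa using this
  -- B's downward fold
  have hf2 : (fun (st : Int × Int × Int) v =>
        let c := PySem.Dict.getD (PySem.Dict.counter naomi) v 0
        let take := min c (st.2.2 - st.2.1)
        ((if PySem.Dict.contains (PySem.Dict.counter ken) v then st.1 else st.1 + (c - take)),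
         st.2.1 + take, st.2.2 + PySem.Dict.getD (PySem.Dict.counter ken) v 0))
      = (fun (st : Int × Int × Int) v =>
        ((if ken.count v = 0
            then st.1 + ((naomi.count v : Int) - min ((naomi.count v : Int)) (st.2.2 - st.2.1))
            else st.1),
         st.2.1 + min ((naomi.count v : Int)) (st.2.2 - st.2.1),
         st.2.2 + (ken.count v : Int))) := by
    funext st v
    by_cases hv : v ∈ ken
    · have hcz : ken.count v ≠ 0 := by
        rw [Ne, List.count_eq_zero]
        exact fun h => h hv
      simp [PySem.Dict.getD_counter, PySem.Dict.contains_counter, hv, hcz]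
    · have hcz : ken.count v = 0 := List.count_eq_zero.2 hv
      simp [PySem.Dict.getD_counter, PySem.Dict.contains_counter, hv, hcz]
  have hB2 : (V.reverse.foldl (fun (st : Int × Int × Int) v =>
        let c := PySem.Dict.getD (PySem.Dict.counter naomi) v 0
        let take := min c (st.2.2 - st.2.1)
        ((if PySem.Dict.contains (PySem.Dict.counter ken) v then st.1 else st.1 + (c - take)),
         st.2.1 + take, st.2.2 + PySem.Dict.getD (PySem.Dict.counter ken) v 0))
        ((0 : Int), (0 : Int), (0 : Int))).1 = (W S.reverse K.reverse : Int) := by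
    rw [hf2, foldW naomi ken V.reverse 0 0 0]
    have hc1 : ∀ v ∈ V.reverse, naomi.count v = (S.reverse).count v := by
      intro v _
      rw [List.count_reverse]
      exact (hSperm.count_eq v).symm
    have hc2 : ∀ v ∈ V.reverse, ken.count v = (K.reverse).count v := by
      intro v _
      rw [List.count_reverse]
      exact (hKperm.count_eq v).symm
    rw [sweepW_congr V.reverse naomi ken S.reverse K.reverse _ hc1 hc2]
    have hVgt : V.reverse.Pairwise (· > ·) := by
      rw [List.pairwise_reverse]
      exact hVlt
    have hSrev : S.reverse.Pairwise (· ≥ ·) := by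
      rw [List.pairwise_reverse]
      exact hSpair
    have hKrev : K.reverse.Pairwise (· ≥ ·) := by
      rw [List.pairwise_reverse]
      exact hKpair
    have hcr : ∀ j, j < S.reverse.length →
        dM (S.reverse.take j) ([] ++ K.reverse) < ([] ++ K.reverse).length := by
      intro j hj
      simp only [List.nil_append]
      rcases hsafe2 with h | h
      · rw [h] at hj; simp at hj
      · rw [List.drop_zero] at h
        have hmono : dM (S.reverse.take j) K.reverse
            ≤ dM (S.reverse.take (S.reverse.length - 1)) K.reverse := by
          have hjle : j ≤ S.reverse.length - 1 := by omega
          have : S.reverse.take j = (S.reverse.take (S.reverse.length - 1)).take j := by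
            rw [List.take_take]
            congr 1
            omega
          rw [this]
          exact dM_prefix_le ..
        omega
    have := sweepW_eq_W V.reverse S.reverse K.reverse [] hVgt hSrev hKrev
      (fun x hx => by
        rw [List.mem_reverse] at hx ⊢
        exact (hVmem x).2 (Or.inl (hSperm.mem_iff.1 hx)))
      (fun y hy => by
        rw [List.mem_reverse] at hy ⊢
        exact (hVmem y).2 (Or.inr (hKperm.mem_iff.1 hy)))
      (by simp)
      hcr
    simpa using this
  rw [hB1, hB2]
  simp
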